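-- pv_equiv track=rewrite | github.com/JaehoonShin2/coding-test | Programmers/문제풀이/Level_1/Level1_이상한 문자 만들기.py | solution
-- ===== SOURCE A (Python) =====
-- def solution(s):
--
--     answer = ''
--     idx = 0
--     for node in s:
--         if node == ' ':
--             idx = 0
--             answer += node
--         else:
--             if idx%2 == 0:
--                 answer += node.upper()
--             else:
--                 answer += node.lower()
--             idx += 1
--
--     return answer
-- ===== SOURCE B (Python) =====
-- def solution(s):
--     return ' '.join(
--         ''.join(c.upper() if i % 2 == 0 else c.lower() for i, c in enumerate(word))
--         for word in s.split(' ')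
--     )
-- ===== Notes on version B (the rewrite author's own statement) =====
-- stated objective: idiomatic
-- what changed: Replaces the single character loop with a manually reset counter by splitting on the single-space separator into word segments, a per-word enumerate-driven case transform, and a single-space join, which reproduces runs of spaces exactly.
import Mathlib
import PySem

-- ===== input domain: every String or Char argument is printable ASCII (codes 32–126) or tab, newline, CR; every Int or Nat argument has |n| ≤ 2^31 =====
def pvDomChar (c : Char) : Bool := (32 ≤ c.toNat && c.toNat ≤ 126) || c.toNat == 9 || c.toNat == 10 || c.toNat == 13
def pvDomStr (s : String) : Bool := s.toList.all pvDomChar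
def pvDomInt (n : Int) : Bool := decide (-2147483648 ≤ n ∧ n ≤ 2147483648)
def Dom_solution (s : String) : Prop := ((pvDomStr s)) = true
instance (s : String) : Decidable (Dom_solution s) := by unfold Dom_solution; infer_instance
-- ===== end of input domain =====

-- B restates A by decomposition: split on the single-space separator, a per-word
-- enumerate-driven upper/lower transform, and a single-space join — instead of one
-- character loop with a manually reset counter.

-- ===== PORT A =====
def solution (s : String) : String :=
  let r := s.toList.foldl
    (fun (st : List Char × Int) node =>
      if node = ' ' then (st.1 ++ [node], 0)
      else if PySem.Int.mod st.2 2 = 0 then (st.1 ++ [PySem.Chars.upperChar node], st.2 + 1)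
      else (st.1 ++ [PySem.Chars.lowerChar node], st.2 + 1))
    ([], 0)
  String.mk r.1

-- ===== PORT B =====
def tweakWord (w : List Char) : List Char :=
  (PySem.List.enumerate w 0).map
    (fun p => if PySem.Int.mod p.1 2 = 0 then PySem.Chars.upperChar p.2 else PySem.Chars.lowerChar p.2)

def solution_alt (s : String) : String :=
  String.mk (PySem.Chars.join [' '] ((PySem.Chars.splitOn s.toList [' ']).map tweakWord))

-- ===== PRECONDITION & SPEC =====
def Spec_solution (s : String) (out : String) : Prop := out = solution_alt s
instance (s : String) (out : String) : Decidable (Spec_solution s out) := by unfold Spec_solution; infer_instance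

-- ===== CLAIM (what is proved, stated in full; the proofs are below) =====
def Claim_equal_solution : Prop := ∀ (s : String), Dom_solution s → Spec_solution s (solution s)

-- ===== LEMMAS AND PROOFS =====

-- The common spine: the characters both programs output, by direct recursion on the input.
def trSpine : List Char → Int → List Char
  | [], _ => []
  | c :: rest, i =>
      if c = ' ' then ' ' :: trSpine rest 0
      else (if PySem.Int.mod i 2 = 0 then PySem.Chars.upperChar c else PySem.Chars.lowerChar c)
            :: trSpine rest (i + 1)

-- Fuel-free split on ' ' with an accumulated (reversed) current word.
def mySplit : List Char → List Char → List (List Char)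
  | [], cur => [cur.reverse]
  | c :: rest, cur =>
      if c = ' ' then cur.reverse :: mySplit rest [] else mySplit rest (c :: cur)

theorem mySplit_ne_nil (l cur : List Char) : mySplit l cur ≠ [] := by
  induction l generalizing cur with
  | nil => simp [mySplit]
  | cons c rest ih =>
      by_cases h : c = ' ' <;> simp [mySplit, h, ih]

theorem foldl_fst (cs : List Char) (acc : List Char) (i : Int) :
    (cs.foldl
      (fun (st : List Char × Int) node =>
        if node = ' ' then (st.1 ++ [node], 0)
        else if PySem.Int.mod st.2 2 = 0 then (st.1 ++ [PySem.Chars.upperChar node], st.2 + 1)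
        else (st.1 ++ [PySem.Chars.lowerChar node], st.2 + 1))
      (acc, i)).1 = acc ++ trSpine cs i := by
  induction cs generalizing acc i with
  | nil => simp [trSpine]
  | cons c rest ih =>
      by_cases h : c = ' '
      · subst h
        rw [List.foldl_cons, if_pos rfl, ih]
        simp [trSpine]
      · by_cases h2 : PySem.Int.mod i 2 = 0
        · rw [List.foldl_cons, if_neg h, if_pos h2, ih]
          simp only [trSpine, if_neg h, if_pos h2, List.append_assoc, List.singleton_append]
        · rw [List.foldl_cons, if_neg h, if_neg h2, ih]
          simp only [trSpine, if_neg h, if_neg h2, List.append_assoc, List.singleton_append]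

theorem go_eq_mySplit (fuel : Nat) (l cur : List Char) (acc : List (List Char))
    (hf : l.length < fuel) :
    PySem.Chars.splitOn.go [' '] fuel l cur acc = acc.reverse ++ mySplit l cur := by
  induction fuel generalizing l cur acc with
  | zero => omega
  | succ fuel ih =>
      cases l with
      | nil => simp [PySem.Chars.splitOn.go, mySplit]
      | cons c rest =>
          by_cases h : c = ' '
          · subst h
            simp only [PySem.Chars.splitOn.go, List.isPrefixOf, mySplit]
            simp [ih rest [] (cur.reverse :: acc) (by simpa using Nat.lt_of_succ_lt_succ hf)]
          · have hp : ([' '].isPrefixOf (c :: rest)) = false := by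
              simp [List.isPrefixOf]
              intro hc; exact absurd hc.symm h
            simp only [PySem.Chars.splitOn.go, hp, mySplit, h]
            simp [ih rest (c :: cur) acc (by simpa using Nat.lt_of_succ_lt_succ hf), h]

theorem tweakWord_nil : tweakWord [] = [] := by simp [tweakWord]

theorem tweakWord_snoc (w : List Char) (c : Char) :
    tweakWord (w ++ [c]) = tweakWord w ++
      [if PySem.Int.mod (w.length : Int) 2 = 0 then PySem.Chars.upperChar c
        else PySem.Chars.lowerChar c] := by
  simp [tweakWord, PySem.List.enumerate_append, PySem.List.enumerate_cons, PySem.List.enumerate_nil]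

theorem join_mySplit (cs cur : List Char) :
    PySem.Chars.join [' '] ((mySplit cs cur).map tweakWord)
      = tweakWord cur.reverse ++ trSpine cs (cur.length : Int) := by
  induction cs generalizing cur with
  | nil => simp [mySplit, trSpine, PySem.Chars.join_singleton]
  | cons c rest ih =>
      by_cases h : c = ' '
      · subst h
        have hne := mySplit_ne_nil rest []
        obtain ⟨hd, tl, he⟩ : ∃ hd tl, mySplit rest [] = hd :: tl := by
          cases hm : mySplit rest [] with
          | nil => exact absurd hm hne
          | cons a b => exact ⟨a, b, rfl⟩
        have key := ih ([] : List Char)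
        rw [he] at key
        simp only [List.map_cons] at key
        simp only [mySplit, trSpine, reduceIte, he, List.map_cons, PySem.Chars.join_cons_cons]
        rw [key]
        simp [tweakWord_nil, trSpine]
      · simp only [mySplit, if_neg h, trSpine, if_neg h]
        rw [ih (c :: cur)]
        have hlen : ((c :: cur).length : Int) = (cur.length : Int) + 1 := by simp
        rw [hlen]
        simp [tweakWord_snoc]

-- ===== VERDICT (by name: the statement is the Claim_ definition above) =====
theorem solution_spec : Claim_equal_solution := by
  intro s _
  unfold Spec_solution solution solution_alt PySem.Chars.splitOn
  rw [go_eq_mySplit _ _ _ _ (by omega)]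
  simp only [List.reverse_nil, List.nil_append]
  rw [foldl_fst, join_mySplit]
  simp [tweakWord_nil]
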